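-- pv_equiv track=rewrite | github.com/JonathanCortez/PySideLayoutTool | PySideLayoutTool/UIEditorLib/StringValidatorClass.py | check_names
-- ===== SOURCE A (Python) =====
-- def check_names(name: str, check_item) -> str:
--     """
--
--     :param name: string that is being evaluated.
--     :param check_item: data that is being evaluated against.
--     :return: get new name.
--     """
--     if name in check_item:
--         str_lenght = len(name)-1
--         if name[str_lenght].isdigit():
--             str_num = str(int(name[str_lenght]) + 1)
--             name = name.replace(name[str_lenght], str_num)
--         else:
--             name += '1'
--
--         return check_names(name,check_item)
--
--     return name
-- ===== SOURCE B (Python) =====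
-- def _next_name(name: str) -> str:
--     last = name[-1]
--     if last.isdigit():
--         return name.replace(last, str(int(last) + 1))
--     return name + '1'
--
--
-- def check_names(name: str, check_item) -> str:
--     # Each pass consumes a distinct member of check_item, so
--     # len(check_item) + 1 passes always suffice to leave the collection.
--     for _ in range(len(check_item) + 1):
--         if name not in check_item:
--             return name
--         name = _next_name(name)
--     return name
-- ===== Notes on version B (the rewrite author's own statement) =====
-- stated objective: idiomatic
-- what changed: Replaced A's tail recursion with an explicit bounded for-loop (range(len(check_item)+1), which provably always suffices because each pass consumes a distinct member of check_item) around the identical one-step name mutation factored into a helper.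
import Mathlib
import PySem

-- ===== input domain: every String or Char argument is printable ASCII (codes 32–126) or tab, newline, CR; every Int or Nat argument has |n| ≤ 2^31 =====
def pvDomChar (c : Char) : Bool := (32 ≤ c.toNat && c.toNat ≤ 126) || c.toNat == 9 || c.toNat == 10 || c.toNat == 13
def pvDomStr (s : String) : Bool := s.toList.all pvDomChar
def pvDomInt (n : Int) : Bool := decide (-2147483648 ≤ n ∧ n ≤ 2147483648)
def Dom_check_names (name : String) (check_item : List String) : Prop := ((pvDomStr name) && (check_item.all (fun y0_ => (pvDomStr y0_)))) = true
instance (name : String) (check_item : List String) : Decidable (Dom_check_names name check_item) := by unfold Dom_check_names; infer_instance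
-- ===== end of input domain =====

-- B replaces A's tail recursion by a bounded for-loop (len(check_item)+1 passes always
-- suffice, since each pass consumes a distinct member of check_item) around the identical
-- one-step mutation; objective: idiomatic iteration instead of recursion.

-- ===== PORT A =====
-- The definitions and lemmas up to pvCnt_dec exist only to justify termination of A's
-- recursion (pvGoA cites pvCnt_dec and pvM_bump by name in its decreasing_by).
def pvM (s : List Char) : Nat := s.length * 1114112 + (s.map Char.toNat).sum

theorem pvM_single (x : Char) : pvM [x] = 1114112 + x.toNat := by simp [pvM]

theorem pvM_append (u v : List Char) : pvM (u ++ v) = pvM u + pvM v := by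
  simp [pvM]; ring

theorem pvM_flatMap_le (f : Char → List Char)
    (hge : ∀ x : Char, x.toNat + 1114112 ≤ pvM (f x)) :
    ∀ s : List Char, pvM s ≤ pvM (s.flatMap f) := by
  intro s
  induction s with
  | nil => simp [pvM]
  | cons x t ih =>
      have hx := hge x
      have hcons : pvM (x :: t) = (x.toNat + 1114112) + pvM t := by simp [pvM]; ring
      rw [hcons, List.flatMap_cons, pvM_append]
      omega

theorem pvM_flatMap_lt (f : Char → List Char)
    (hge : ∀ x : Char, x.toNat + 1114112 ≤ pvM (f x))
    (a : Char) (hst : a.toNat + 1114112 < pvM (f a)) :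
    ∀ s : List Char, a ∈ s → pvM s < pvM (s.flatMap f) := by
  intro s
  induction s with
  | nil => intro h; cases h
  | cons x t ih =>
      intro hmem
      have hx := hge x
      have hcons : pvM (x :: t) = (x.toNat + 1114112) + pvM t := by simp [pvM]; ring
      rw [hcons, List.flatMap_cons, pvM_append]
      have hle := pvM_flatMap_le f hge t
      rcases List.mem_cons.mp hmem with h | h
      · subst h; omega
      · have := ih h; omega

theorem pv_go_single (a : Char) (new : List Char) :
    ∀ (fuel : Nat) (l acc : List Char), l.length ≤ fuel →
      PySem.Chars.replace.go [a] new fuel l acc =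
        acc.reverse ++ l.flatMap (fun x => if x = a then new else [x]) := by
  intro fuel
  induction fuel with
  | zero =>
      intro l acc h
      have : l = [] := List.eq_nil_of_length_eq_zero (Nat.le_zero.mp h)
      subst this
      simp [PySem.Chars.replace.go]
  | succ n ih =>
      intro l acc h
      cases l with
      | nil => simp [PySem.Chars.replace.go]
      | cons c t =>
          by_cases hac : a = c
          · subst hac
            rw [PySem.Chars.replace.go]
            simp only [List.isPrefixOf, BEq.refl, Bool.true_and, if_true]
            rw [ih _ _ (by simpa using Nat.le_of_succ_le_succ h)]
            simp
          · rw [PySem.Chars.replace.go]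
            have : [a].isPrefixOf (c :: t) = false := by
              simp [List.isPrefixOf, hac]
            rw [this]
            simp only [Bool.false_eq_true, if_false]
            rw [ih _ _ (by simpa using Nat.le_of_succ_le_succ h)]
            simp [Ne.symm hac]

theorem pv_replace_single (a : Char) (new : List Char) (s : List Char) :
    PySem.Chars.replace s [a] new = s.flatMap (fun x => if x = a then new else [x]) := by
  rw [PySem.Chars.replace]
  simp only [List.isEmpty, Bool.false_eq_true, if_false]
  exact (pv_go_single a new s.length s [] le_rfl).trans (by simp)

theorem pv_digit_cases (c : Char) (h : PySem.Chars.isdigit c = true) :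
    c = '0' ∨ c = '1' ∨ c = '2' ∨ c = '3' ∨ c = '4' ∨ c = '5' ∨ c = '6' ∨ c = '7' ∨
    c = '8' ∨ c = '9' := by
  simp only [PySem.Chars.isdigit, Bool.and_eq_true, decide_eq_true_eq] at h
  obtain ⟨h1, h2⟩ := h
  have h1' : 48 ≤ c.toNat := h1
  have h2' : c.toNat ≤ 57 := h2
  have hd : c.toNat = 48 ∨ c.toNat = 49 ∨ c.toNat = 50 ∨ c.toNat = 51 ∨ c.toNat = 52 ∨
      c.toNat = 53 ∨ c.toNat = 54 ∨ c.toNat = 55 ∨ c.toNat = 56 ∨ c.toNat = 57 := by omega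
  rcases hd with h|h|h|h|h|h|h|h|h|h
  · exact Or.inl (Char.ext (UInt32.toNat_inj.mp h))
  · exact Or.inr (Or.inl (Char.ext (UInt32.toNat_inj.mp h)))
  · exact Or.inr (Or.inr (Or.inl (Char.ext (UInt32.toNat_inj.mp h))))
  · exact Or.inr (Or.inr (Or.inr (Or.inl (Char.ext (UInt32.toNat_inj.mp h)))))
  · exact Or.inr (Or.inr (Or.inr (Or.inr (Or.inl (Char.ext (UInt32.toNat_inj.mp h))))))
  · exact Or.inr (Or.inr (Or.inr (Or.inr (Or.inr (Or.inl (Char.ext (UInt32.toNat_inj.mp h)))))))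
  · exact Or.inr (Or.inr (Or.inr (Or.inr (Or.inr (Or.inr (Or.inl (Char.ext (UInt32.toNat_inj.mp h))))))))
  · exact Or.inr (Or.inr (Or.inr (Or.inr (Or.inr (Or.inr (Or.inr (Or.inl (Char.ext (UInt32.toNat_inj.mp h)))))))))
  · exact Or.inr (Or.inr (Or.inr (Or.inr (Or.inr (Or.inr (Or.inr (Or.inr (Or.inl (Char.ext (UInt32.toNat_inj.mp h))))))))))
  · exact Or.inr (Or.inr (Or.inr (Or.inr (Or.inr (Or.inr (Or.inr (Or.inr (Or.inr (Char.ext (UInt32.toNat_inj.mp h))))))))))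

theorem pv_bump_case (d : Char) (new : List Char)
    (h1 : d.toNat + 1114112 < pvM new) (s : List Char) (hmem : d ∈ s) :
    pvM s < pvM (s.flatMap (fun x => if x = d then new else [x])) := by
  apply pvM_flatMap_lt _ _ d _ s hmem
  · intro x
    by_cases hx : x = d
    · subst hx; simpa using Nat.le_of_lt h1
    · rw [if_neg hx, pvM_single]; omega
  · simpa using h1

theorem pv_mem_of_pyGet?_last (s : List Char) (c : Char)
    (hc : PySem.List.pyGet? s ((s.length : Int) - 1) = some c) : c ∈ s := by
  cases s with
  | nil => simp [PySem.List.pyGet?, PySem.List.pyIdx?] at hc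
  | cons x t =>
      have h1 : ((x :: t).length : Int) - 1 = ((t.length : Nat) : Int) := by
        simp
      rw [h1, PySem.List.pyGet?_natCast] at hc
      exact List.mem_of_getElem? hc

theorem pvM_bump (s : List Char) (c : Char)
    (hc : PySem.List.pyGet? s ((s.length : Int) - 1) = some c) :
    pvM s < pvM (if PySem.Chars.isdigit c = true then
        PySem.Chars.replace s [c]
          (PySem.Int.toChars ((PySem.Int.ofChars? [c]).getD 0 + 1))
      else s ++ ['1']) := by
  have hmem := pv_mem_of_pyGet?_last s c hc
  by_cases hd : PySem.Chars.isdigit c = true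
  · rw [if_pos hd]
    rcases pv_digit_cases c hd with h|h|h|h|h|h|h|h|h|h <;> subst h <;>
      rw [pv_replace_single] <;>
      [ (exact pv_bump_case '0' _ (by decide) s hmem);
        (exact pv_bump_case '1' _ (by decide) s hmem);
        (exact pv_bump_case '2' _ (by decide) s hmem);
        (exact pv_bump_case '3' _ (by decide) s hmem);
        (exact pv_bump_case '4' _ (by decide) s hmem);
        (exact pv_bump_case '5' _ (by decide) s hmem);
        (exact pv_bump_case '6' _ (by decide) s hmem);
        (exact pv_bump_case '7' _ (by decide) s hmem);
        (exact pv_bump_case '8' _ (by decide) s hmem);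
        (exact pv_bump_case '9' _ (by decide) s hmem) ]
  · rw [if_neg hd, pvM_append, pvM_single]
    omega

def pvCnt (s : List Char) (items : List (List Char)) : Nat :=
  (items.filter (fun x => pvM s ≤ pvM x)).length

theorem pvCnt_mono (s s' : List Char) (h : pvM s < pvM s') (items : List (List Char)) :
    pvCnt s' items ≤ pvCnt s items := by
  unfold pvCnt
  rw [← List.countP_eq_length_filter, ← List.countP_eq_length_filter]
  exact List.countP_mono_left (fun x _ hx => by
    simp only [decide_eq_true_eq] at *; omega)

theorem pvCnt_dec {s s' : List Char} {items : List (List Char)}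
    (hmem : s ∈ items) (h : pvM s < pvM s') : pvCnt s' items < pvCnt s items := by
  induction items with
  | nil => cases hmem
  | cons y t ih =>
      have hstep : pvCnt s' (y :: t) ≤ pvCnt s' t + 1 ∧ pvCnt s t ≤ pvCnt s (y :: t) ∧
          (pvCnt s' (y :: t) = pvCnt s' t + 1 → pvCnt s (y :: t) = pvCnt s t + 1) := by
        unfold pvCnt
        rw [List.filter_cons, List.filter_cons]
        by_cases hy' : pvM s' ≤ pvM y
        · rw [if_pos (by simpa using hy'), if_pos (by simp only [decide_eq_true_eq]; omega)]
          simp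
        · rw [if_neg (by simpa using hy')]
          split <;> simp
      rcases List.mem_cons.mp hmem with hy | ht
      · subst hy
        have h1 : pvCnt s' (s :: t) = pvCnt s' t := by
          unfold pvCnt
          rw [List.filter_cons, if_neg (by simp only [decide_eq_true_eq]; omega)]
        have h2 : pvCnt s (s :: t) = pvCnt s t + 1 := by
          unfold pvCnt
          rw [List.filter_cons, if_pos (by simp)]
          simp
        have := pvCnt_mono s s' h t
        omega
      · have := ih ht
        omega

def pvGoA (s : List Char) (items : List (List Char)) : List Char :=
  if hmem : s ∈ items then
    match hc : PySem.List.pyGet? s ((s.length : Int) - 1) with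
    | none => s
    | some c =>
      if PySem.Chars.isdigit c = true then
        pvGoA (PySem.Chars.replace s [c]
          (PySem.Int.toChars ((PySem.Int.ofChars? [c]).getD 0 + 1))) items
      else
        pvGoA (s ++ ['1']) items
  else s
termination_by pvCnt s items
decreasing_by
  · exact pvCnt_dec hmem (by have := pvM_bump s c hc; simpa [*] using this)
  · exact pvCnt_dec hmem (by have := pvM_bump s c hc; simpa [*] using this)

def check_names (name : String) (check_item : List String) : String :=
  String.ofList (pvGoA name.toList (check_item.map String.toList))

-- ===== PORT B =====
def pvStep (s : List Char) : List Char :=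
  match PySem.List.pyGet? s (-1 : Int) with
  | none => s
  | some last =>
    if PySem.Chars.isdigit last = true then
      PySem.Chars.replace s [last]
        (PySem.Int.toChars ((PySem.Int.ofChars? [last]).getD 0 + 1))
    else s ++ ['1']

def pvGoB (fuel : Nat) (s : List Char) (items : List (List Char)) : List Char :=
  match fuel with
  | 0 => s
  | n + 1 => if s ∈ items then pvGoB n (pvStep s) items else s

def check_names_alt (name : String) (check_item : List String) : String :=
  String.ofList (pvGoB (check_item.length + 1) name.toList (check_item.map String.toList))

-- ===== PRECONDITION & SPEC =====
-- Pre_ excludes only the inputs on which Python A raises IndexError (so does Python B):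
-- an empty name that is a member of check_item.
def Pre_check_names (name : String) (check_item : List String) : Prop :=
  ¬ (name = "" ∧ name ∈ check_item)
instance (name : String) (check_item : List String) : Decidable (Pre_check_names name check_item) := by unfold Pre_check_names; infer_instance

def pvWitness_check_names : String × List String := ("a", ["a", "a1"])

def Spec_check_names (name : String) (check_item : List String) (out : String) : Prop := out = check_names_alt name check_item
instance (name : String) (check_item : List String) (out : String) : Decidable (Spec_check_names name check_item out) := by unfold Spec_check_names; infer_instance

-- ===== CLAIM (what is proved, stated in full; the proofs are below) =====
def Claim_equal_check_names : Prop := ∀ (name : String) (check_item : List String), Dom_check_names name check_item → Pre_check_names name check_item → Spec_check_names name check_item (check_names name check_item)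

-- ===== LEMMAS AND PROOFS =====
theorem pv_last_idx (s : List Char) :
    PySem.List.pyGet? s ((s.length : Int) - 1) = PySem.List.pyGet? s (-1) := by
  cases s with
  | nil => simp [PySem.List.pyGet?, PySem.List.pyIdx?]
  | cons x t =>
      simp only [PySem.List.pyGet?, PySem.List.pyIdx?, List.length_cons]
      have h0 : ((t.length + 1 : Nat) : Int) - 1 = (t.length : Int) := by push_cast; omega
      rw [h0]
      have h1 : (0 : Int) ≤ (t.length : Int) := by positivity
      have h2 : ¬ (0 : Int) ≤ -1 := by omega
      have h3 : (t.length : Int) < ((t.length + 1 : Nat) : Int) := by push_cast; omega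
      have h4 : -((t.length + 1 : Nat) : Int) ≤ -1 := by push_cast; omega
      rw [if_pos h1, if_pos h3, if_neg h2, if_pos h4]
      congr 1

theorem pvGoB_empty (k : Nat) (s : List Char) (items : List (List Char))
    (h : PySem.List.pyGet? s (-1 : Int) = none) : pvGoB k s items = s := by
  induction k with
  | zero => rfl
  | succ n ih =>
      rw [pvGoB]
      split
      · rw [show pvStep s = s by simp [pvStep, h]]; exact ih
      · rfl

theorem pvGoA_eq_pvGoB (n : Nat) (s : List Char) (items : List (List Char))
    (h : pvCnt s items < n) : pvGoA s items = pvGoB n s items := by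
  induction n generalizing s with
  | zero => omega
  | succ k ih =>
      rw [pvGoA, pvGoB]
      by_cases hmem : s ∈ items
      · rw [dif_pos hmem, if_pos hmem]
        split
        next hc =>
            have h' : PySem.List.pyGet? s (-1 : Int) = none := by
              rw [← pv_last_idx]; exact hc
            rw [show pvStep s = s by simp [pvStep, h']]
            exact (pvGoB_empty k s items h').symm
        next c hc =>
            have hstep : pvStep s = (if PySem.Chars.isdigit c = true then
                PySem.Chars.replace s [c]
                  (PySem.Int.toChars ((PySem.Int.ofChars? [c]).getD 0 + 1))
              else s ++ ['1']) := by
              rw [pvStep, ← pv_last_idx, hc]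
            have hlt := pvCnt_dec hmem (pvM_bump s c hc) (items := items)
            by_cases hd : PySem.Chars.isdigit c = true
            · rw [if_pos hd] at hstep hlt ⊢
              rw [hstep, ← ih _ (by omega)]
            · rw [if_neg hd] at hstep hlt ⊢
              rw [hstep, ← ih _ (by omega)]
      · rw [dif_neg hmem, if_neg hmem]

-- ===== VERDICT (by name: the statement is the Claim_ definition above) =====
theorem check_names_spec : Claim_equal_check_names := by
  intro name check_item _ _
  unfold Spec_check_names check_names check_names_alt
  have h : pvCnt name.toList (check_item.map String.toList) < check_item.length + 1 := by
    have hle := List.length_filter_le (fun x => decide (pvM name.toList ≤ pvM x)) (check_item.map String.toList)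
    simp only [List.length_map] at hle
    exact Nat.lt_succ_of_le hle
  rw [pvGoA_eq_pvGoB _ _ _ h]
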